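-- pv_equiv track=rewrite | github.com/TheGlobalist/NLPFinalProj | code/predict_multilingual.py | convert_from_bnlist_2_argmax_candidates
-- ===== SOURCE A (Python) =====
-- from typing import List, Dict, Tuple
--
-- def convert_from_bnlist_2_argmax_candidates(list_of_bn: List, label_vocab: Dict, predictions) -> Tuple:
--     """
--     Cast the given list (which contains only BN ids) to numbers that are going to be candidates for the argmax function
--     :param list_of_bn: the list to cast
--     :param label_vocab: the vocabulary to use to perform the conversion
--     :param predictions: the predictions made by the system
--     :return: the converted list
--     """
--     list_of_candidates = []
--     list_of_indices_to_delete = []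
--     for candidate_index in range(len(list_of_bn)):
--         try:
--             is_it_here = next(value for key, value in label_vocab.items() if '_bn:' in key and key.split('_')[1] == list_of_bn[candidate_index])
--             conversion = predictions[int(is_it_here)]
--             list_of_candidates.append(conversion)
--         except:
--             list_of_indices_to_delete.append(candidate_index)
--     if list_of_indices_to_delete:
--         list_of_bn = [list_of_bn[prov_index] for prov_index in range(len(list_of_bn)) if prov_index not in list_of_indices_to_delete]
--     return list_of_candidates,list_of_bn
-- ===== SOURCE B (Python) =====
-- from typing import List, Dict, Tuple
--
-- def convert_from_bnlist_2_argmax_candidates(list_of_bn: List, label_vocab: Dict, predictions) -> Tuple: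
--     """Single pass: on lookup success append score and keep the bn; no index bookkeeping, no second filter pass."""
--     candidates = []
--     kept = []
--     for bn in list_of_bn:
--         try:
--             is_it_here = next(value for key, value in label_vocab.items() if '_bn:' in key and key.split('_')[1] == bn)
--             candidates.append(predictions[int(is_it_here)])
--             kept.append(bn)
--         except:
--             pass
--     return candidates, kept
-- ===== Notes on version B (the rewrite author's own statement) =====
-- stated objective: simpler
-- what changed: Replaces A's two-pass scheme (collect indices of failed lookups, then rebuild list_of_bn with a range/membership filter comprehension) by a single loop over the bn values that appends the score and the bn on lookup success, dropping the index bookkeeping entirely.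
import Mathlib
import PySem

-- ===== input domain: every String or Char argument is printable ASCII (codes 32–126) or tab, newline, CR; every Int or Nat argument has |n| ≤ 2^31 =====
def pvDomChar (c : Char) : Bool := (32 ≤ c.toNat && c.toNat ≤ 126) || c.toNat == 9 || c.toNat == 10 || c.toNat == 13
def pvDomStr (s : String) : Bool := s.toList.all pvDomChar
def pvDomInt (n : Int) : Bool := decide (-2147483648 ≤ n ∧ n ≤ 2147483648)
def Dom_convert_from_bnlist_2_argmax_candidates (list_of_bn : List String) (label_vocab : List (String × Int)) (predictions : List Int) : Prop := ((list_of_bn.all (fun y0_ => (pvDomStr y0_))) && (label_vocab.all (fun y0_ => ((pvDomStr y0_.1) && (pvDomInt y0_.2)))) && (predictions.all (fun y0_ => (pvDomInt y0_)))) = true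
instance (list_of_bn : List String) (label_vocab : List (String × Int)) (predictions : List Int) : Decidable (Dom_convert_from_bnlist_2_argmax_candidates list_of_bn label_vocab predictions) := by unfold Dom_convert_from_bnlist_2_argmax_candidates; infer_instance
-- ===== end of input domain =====

-- B drops A's deleted-index bookkeeping and second filtering pass: one loop that on lookup
-- success appends the score and the bn (objective: simpler). Equivalence is by return VALUE
-- (A may return the very input list object; B always builds a fresh equal list).

-- ===== PORT A =====
-- the 'next(value for key, value in label_vocab.items() if ...)' lookup, shared verbatim by both
-- Pythons; 'predictions[int(v)]' is pyGet? (int() of an int is the identity). The '[1]' on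
-- key.split('_') cannot raise when '_bn:' in key holds (the key then contains '_'); split? with the
-- nonempty separator "_" is always some, so .getD [] is exact. The
-- Bool '&&' (pyGet? … == some bn) is exact for Python's short-circuit 'and'.
def bnFind (label_vocab : List (String × Int)) (bn : String) : Option Int :=
  (label_vocab.find? (fun kv =>
      PySem.Str.isIn "_bn:" kv.1 &&
      (PySem.List.pyGet? ((PySem.Str.split? kv.1 "_").getD []) 1 == some bn))).map (·.2)

def bnLookup (label_vocab : List (String × Int)) (predictions : List Int) (bn : String) : Option Int :=
  match bnFind label_vocab bn with
  | some v => PySem.List.pyGet? predictions v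
  | none => none

def convert_from_bnlist_2_argmax_candidates (list_of_bn : List String) (label_vocab : List (String × Int)) (predictions : List Int) : List Int × List String :=
  -- loop over range(len(list_of_bn)) accumulating (list_of_candidates, list_of_indices_to_delete)
  let st := (List.range list_of_bn.length).foldl
    (fun (st : List Int × List Nat) i =>
      match bnLookup label_vocab predictions ((list_of_bn[i]?).getD "") with
      | some c => (st.1 ++ [c], st.2)          -- try branch: append conversion
      | none => (st.1, st.2 ++ [i]))           -- except branch: remember the index
    ([], [])
  if st.2.isEmpty then (st.1, list_of_bn)
  else (st.1, ((List.range list_of_bn.length).filter (fun i => !st.2.contains i)).map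
                (fun i => (list_of_bn[i]?).getD ""))

-- ===== PORT B =====
def convert_from_bnlist_2_argmax_candidates_alt (list_of_bn : List String) (label_vocab : List (String × Int)) (predictions : List Int) : List Int × List String :=
  list_of_bn.foldl
    (fun (st : List Int × List String) bn =>
      match bnLookup label_vocab predictions bn with
      | some c => (st.1 ++ [c], st.2 ++ [bn])
      | none => st)
    ([], [])

-- ===== PRECONDITION & SPEC =====
def Spec_convert_from_bnlist_2_argmax_candidates (list_of_bn : List String) (label_vocab : List (String × Int)) (predictions : List Int) (out : List Int × List String) : Prop := out = convert_from_bnlist_2_argmax_candidates_alt list_of_bn label_vocab predictions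
instance (list_of_bn : List String) (label_vocab : List (String × Int)) (predictions : List Int) (out : List Int × List String) : Decidable (Spec_convert_from_bnlist_2_argmax_candidates list_of_bn label_vocab predictions out) := by unfold Spec_convert_from_bnlist_2_argmax_candidates; infer_instance

-- ===== CLAIM (what is proved, stated in full; the proofs are below) =====
def Claim_equal_convert_from_bnlist_2_argmax_candidates : Prop := ∀ (list_of_bn : List String) (label_vocab : List (String × Int)) (predictions : List Int), Dom_convert_from_bnlist_2_argmax_candidates list_of_bn label_vocab predictions → Spec_convert_from_bnlist_2_argmax_candidates list_of_bn label_vocab predictions (convert_from_bnlist_2_argmax_candidates list_of_bn label_vocab predictions)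

-- ===== LEMMAS AND PROOFS =====

-- B's fold is filterMap/filter over the list
theorem altB_char (vocab : List (String × Int)) (preds : List Int) :
    ∀ (bns : List String) (c : List Int) (k : List String),
      bns.foldl (fun (st : List Int × List String) bn =>
          match bnLookup vocab preds bn with
          | some c => (st.1 ++ [c], st.2 ++ [bn])
          | none => st) (c, k)
      = (c ++ bns.filterMap (bnLookup vocab preds),
         k ++ bns.filter (fun bn => (bnLookup vocab preds bn).isSome)) := by
  intro bns
  induction bns with
  | nil => intro c k; simp
  | cons b t ih =>
    intro c k
    simp only [List.foldl_cons, List.filterMap_cons, List.filter_cons]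
    cases h : bnLookup vocab preds b with
    | some v => simp [ih]
    | none => simp [ih]

-- A's index loop is filterMap/filter over the range
theorem loopA_char (vocab : List (String × Int)) (preds : List Int) (bns : List String) :
    ∀ n : Nat,
      (List.range n).foldl (fun (st : List Int × List Nat) i =>
          match bnLookup vocab preds ((bns[i]?).getD "") with
          | some c => (st.1 ++ [c], st.2)
          | none => (st.1, st.2 ++ [i])) ([], [])
      = ((List.range n).filterMap (fun i => bnLookup vocab preds ((bns[i]?).getD "")),
         (List.range n).filter (fun i => (bnLookup vocab preds ((bns[i]?).getD "")).isNone)) := by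
  intro n
  induction n with
  | zero => simp
  | succ m ih =>
    rw [List.range_succ]
    simp only [List.foldl_append, List.filterMap_append, List.filter_append, ih, List.foldl_cons,
      List.foldl_nil, List.filterMap_cons, List.filter_cons, List.filterMap_nil, List.filter_nil]
    cases h : bnLookup vocab preds ((bns[m]?).getD "") with
    | some v => simp
    | none => simp

-- indexing back the range reproduces the list
theorem map_get_range (bns : List String) :
    (List.range bns.length).map (fun i => (bns[i]?).getD "") = bns := by
  apply List.ext_getElem
  · simp
  · intro i h1 h2
    simp only [List.getElem_map, List.getElem_range]
    rw [List.getElem?_eq_getElem h2]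
    rfl

theorem filter_get_range (p : String → Bool) (bns : List String) :
    ((List.range bns.length).filter (fun i => p ((bns[i]?).getD ""))).map (fun i => (bns[i]?).getD "")
      = bns.filter p := by
  conv_rhs => rw [← map_get_range bns]
  rw [List.filter_map]
  rfl

theorem convert_spec_aux (bns : List String) (vocab : List (String × Int)) (preds : List Int) :
    convert_from_bnlist_2_argmax_candidates bns vocab preds
      = convert_from_bnlist_2_argmax_candidates_alt bns vocab preds := by
  unfold convert_from_bnlist_2_argmax_candidates convert_from_bnlist_2_argmax_candidates_alt
  rw [altB_char, loopA_char]
  simp only [List.nil_append]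
  set f := bnLookup vocab preds with hf
  set g : Nat → String := fun i => (bns[i]?).getD "" with hg
  have hc : (List.range bns.length).filterMap (fun i => f (g i)) = bns.filterMap f := by
    conv_rhs => rw [← map_get_range bns]
    rw [List.filterMap_map]
    rfl
  by_cases hemp : ((List.range bns.length).filter (fun i => (f (g i)).isNone)).isEmpty = true
  · rw [if_pos hemp, hc]
    rw [List.isEmpty_iff, List.filter_eq_nil_iff] at hemp
    have : bns.filter (fun bn => (f bn).isSome) = bns := by
      apply List.filter_eq_self.mpr
      intro a ha
      obtain ⟨i, hi, rfl⟩ := List.mem_map.mp (show a ∈ (List.range bns.length).map g by rw [map_get_range]; exact ha)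
      have := hemp i hi
      cases hx : f (g i) with
      | some v => simp
      | none => exact absurd (by simp [hx]) this
    rw [this]
  · rw [if_neg hemp, hc]
    have hcong : (List.range bns.length).filter
        (fun i => !((List.range bns.length).filter (fun j => (f (g j)).isNone)).contains i)
        = (List.range bns.length).filter (fun i => (f (g i)).isSome) := by
      apply List.filter_congr
      intro i hi
      have : ((List.range bns.length).filter (fun j => (f (g j)).isNone)).contains i
          = (f (g i)).isNone := by
        cases hx : (f (g i)).isNone with
        | true => simp [List.mem_filter, hi, hx]
        | false => simp [List.mem_filter, hx]
      rw [this]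
      cases hx : f (g i) <;> simp
    rw [hcong, filter_get_range (fun bn => (f bn).isSome) bns]

-- ===== VERDICT (by name: the statement is the Claim_ definition above) =====
theorem convert_from_bnlist_2_argmax_candidates_spec : Claim_equal_convert_from_bnlist_2_argmax_candidates := by
  intro bns vocab preds _
  exact convert_spec_aux bns vocab preds
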